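-- pv_equiv track=rewrite | github.com/paciFIST-Studios/pacifist | py_tools/generateTypesHeader/generateTypesHeader.py | generate_strings_for_type_symbols
-- ===== SOURCE A (Python) =====
-- def split_camel_case_string(string: str) -> list:
--     """ Splits a string based on the casing.  Only puts a split when a lowercase letter goes to an uppercase letter.
--     This keeps Acronyms together, and ensure Enum words put E with the first word, instead of on its own.
--
--     Args:
--         string(str) - the string to split
--
--     Return:
--         the_split_string(list) - a list of 1 element, if no splits occurred, otherwise more elements
--     """
--     results = []
--
--     # first, we're just going to record where the splits need to happen,
--     # then we're going to actually create the splits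
--
--     split_indices = []
--     for i in range(1, len(string)):
--         previous_character = string[i-1]
--         current_character = string[i]
--
--         # we're only recording indices where a lowercase letter flows into
--         # an uppercase letter.  When an uppercase goes to a lowercase, that's
--         # just moving from the first letter of a capitalized word, to the second
--         # the other way around is moving from one word to a different word,
--         # in camel case
--         if previous_character.islower() and current_character.isupper():
--             split_indices.append(i)
--
--     if not split_indices:
--         # there is one or fewer words in this string, so return it
--         results.append(string)
--     else:
--         current_entry = []
--
--         # we need to cache this value, so we can use it for the next split
--         last_index = 0
--         for index in split_indices:
--             word = string[last_index:index]
--             current_entry.append(word)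
--             last_index = index
--
--         # also record the last word, which starts at this last split index and goes to the end
--         current_entry.append(string[last_index:])
--
--         for entry in current_entry:
--             results.append(entry)
--
--     return results
--
-- def generate_strings_for_type_symbols(type_symbols: list) -> list:
--     results = []
--
--     for ts in type_symbols:
--         string = ts
--         # turn this on to just use the base word
--         #string = string.split('_const_ptr_t')[0]
--         #string = string.split('_ptr_t')[0]
--         #string = string.split('_t')[0]
--
--         casing_split = split_camel_case_string(string)
--         if casing_split not in results:
--             results.append(casing_split)
--
--     return results
-- ===== SOURCE B (Python) =====
-- def split_camel_case_string(string: str) -> list: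
--     """Streaming split: build each word character by character, closing the
--     current word whenever a lowercase letter is followed by an uppercase one.
--     No index table and no slicing."""
--     words = []
--     cur = ""
--     prev_lower = False
--     for ch in string:
--         if prev_lower and ch.isupper():
--             words.append(cur)
--             cur = ""
--         cur += ch
--         prev_lower = ch.islower()
--     words.append(cur)
--     return words
--
-- def generate_strings_for_type_symbols(type_symbols: list) -> list:
--     results = []
--     seen = set()
--     for ts in type_symbols:
--         casing_split = split_camel_case_string(ts)
--         key = tuple(casing_split)
--         if key not in seen:
--             seen.add(key)
--             results.append(casing_split)
--     return results
-- ===== Notes on version B (the rewrite author's own statement) =====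
-- stated objective: faster
-- what changed: split_camel_case_string is rewritten as a streaming character-by-character word builder (accumulate the current word, close it at each lower-to-upper boundary) instead of A's record-boundary-indices-then-slice scheme, and the dedup keeps a hash set of already-seen splits instead of rescanning the results list.
import Mathlib
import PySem

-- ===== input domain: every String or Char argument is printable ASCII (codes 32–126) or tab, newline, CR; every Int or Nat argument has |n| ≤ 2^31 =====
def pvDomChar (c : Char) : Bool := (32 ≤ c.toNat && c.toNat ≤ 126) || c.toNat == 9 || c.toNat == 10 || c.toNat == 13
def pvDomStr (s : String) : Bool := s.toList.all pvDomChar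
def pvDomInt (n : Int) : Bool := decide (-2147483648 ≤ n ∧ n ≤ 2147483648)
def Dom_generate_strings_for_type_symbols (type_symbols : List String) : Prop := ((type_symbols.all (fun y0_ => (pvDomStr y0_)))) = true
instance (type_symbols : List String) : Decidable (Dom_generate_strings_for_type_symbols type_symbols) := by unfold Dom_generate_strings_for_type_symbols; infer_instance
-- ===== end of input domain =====

-- B: split_camel_case_string as a streaming character-by-character word builder
-- (no index table, no slicing) and a seen-set dedup instead of the list rescan.


-- ===== PORT A =====
-- A: record all lower->upper boundary indices first, then slice the string at them.
def split_camel_case_string (string : String) : List String :=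
  let split_indices : List Int :=
    (PySem.List.pyRange 1 (PySem.Str.len string) 1).foldl
      (fun acc i =>
        if PySem.Chars.islower ((PySem.Str.pyGet? string (i - 1)).getD ' ') &&
           PySem.Chars.isupper ((PySem.Str.pyGet? string i).getD ' ')
        then acc ++ [i] else acc) []
  if split_indices = [] then
    [string]
  else
    let st := split_indices.foldl
      (fun (p : List String × Int) index =>
        (p.1 ++ [PySem.Str.slice string (some p.2) (some index)], index)) ([], 0)
    let current_entry := st.1 ++ [PySem.Str.slice string (some st.2) none]
    current_entry.foldl (fun results entry => results ++ [entry]) []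

def generate_strings_for_type_symbols (type_symbols : List String) : List (List String) :=
  type_symbols.foldl
    (fun results ts =>
      let casing_split := split_camel_case_string ts
      if casing_split ∈ results then results else results ++ [casing_split]) []

-- ===== PORT B =====
-- B: stream the characters once, growing the current word (a Python str,
-- modelled as its List Char) and closing it at each lower->upper boundary.
def split_camel_case_string_alt (string : String) : List String :=
  let st := string.toList.foldl
    (fun (p : List String × List Char × Bool) ch =>
      if p.2.2 && PySem.Chars.isupper ch then
        (p.1 ++ [String.ofList p.2.1], [ch], PySem.Chars.islower ch)
      else
        (p.1, p.2.1 ++ [ch], PySem.Chars.islower ch))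
    ([], [], false)
  st.1 ++ [String.ofList st.2.1]

-- dedup via a set of already-seen splits (tuple(casing_split) in Python)
def generate_strings_for_type_symbols_alt (type_symbols : List String) : List (List String) :=
  (type_symbols.foldl
    (fun (st : List (List String) × PySem.Set (List String)) ts =>
      let casing_split := split_camel_case_string_alt ts
      if PySem.Set.contains st.2 casing_split then st
      else (st.1 ++ [casing_split], PySem.Set.add st.2 casing_split)) ([], PySem.Set.empty)).1

-- ===== PRECONDITION & SPEC =====
def Spec_generate_strings_for_type_symbols (type_symbols : List String) (out : List (List String)) : Prop := out = generate_strings_for_type_symbols_alt type_symbols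
instance (type_symbols : List String) (out : List (List String)) : Decidable (Spec_generate_strings_for_type_symbols type_symbols out) := by unfold Spec_generate_strings_for_type_symbols; infer_instance

-- ===== CLAIM (what is proved, stated in full; the proofs are below) =====
def Claim_equal_generate_strings_for_type_symbols : Prop := ∀ (type_symbols : List String), Dom_generate_strings_for_type_symbols type_symbols → Spec_generate_strings_for_type_symbols type_symbols (generate_strings_for_type_symbols type_symbols)

-- ===== LEMMAS AND PROOFS =====

-- The boundary test at index i (list level).
def pvB (cs : List Char) (i : Int) : Bool :=
  PySem.Chars.islower ((PySem.List.pyGet? cs (i - 1)).getD ' ') &&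
  PySem.Chars.isupper ((PySem.List.pyGet? cs i).getD ' ')

-- A's boundary-index table, list level.
def pvBs (cs : List Char) : List Int :=
  (PySem.List.pyRange 1 (cs.length : Int) 1).filter (pvB cs)

def pvSliceStep (cs : List Char) (p : List (List Char) × Int) (i : Int) :
    List (List Char) × Int :=
  (p.1 ++ [PySem.Chars.slice cs (some p.2) (some i)], i)

-- A's slice fold, list level.
def pvSt (cs : List Char) : List (List Char) × Int :=
  (pvBs cs).foldl (pvSliceStep cs) ([], 0)

-- B's step, list level.
def pvStepC (p : List (List Char) × List Char × Bool) (c : Char) :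
    List (List Char) × List Char × Bool :=
  if p.2.2 && PySem.Chars.isupper c then (p.1 ++ [p.2.1], [c], PySem.Chars.islower c)
  else (p.1, p.2.1 ++ [c], PySem.Chars.islower c)

def pvCSt (cs : List Char) : List (List Char) × List Char × Bool :=
  cs.foldl pvStepC ([], [], false)

-- "previous char was lowercase" after consuming cs (false for the empty string)
def pvPL (cs : List Char) : Bool := PySem.Chars.islower (cs.getLast?.getD ' ')

theorem pvB_append_lt (cs : List Char) (c : Char) {i : Int}
    (h1 : 1 ≤ i) (h2 : i < (cs.length : Int)) : pvB (cs ++ [c]) i = pvB cs i := by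
  obtain ⟨j, rfl⟩ : ∃ j : Nat, i = (j : Int) := ⟨i.toNat, by omega⟩
  have hj2 : j < cs.length := by exact_mod_cast h2
  have hj3 : j - 1 < cs.length := by omega
  have e1 : (j : Int) - 1 = ((j - 1 : Nat) : Int) := by omega
  unfold pvB
  rw [e1]
  simp [List.getElem?_append_left, hj2, hj3]

theorem pvB_append_last (cs : List Char) (c : Char) (h : cs ≠ []) :
    pvB (cs ++ [c]) (cs.length : Int) = (pvPL cs && PySem.Chars.isupper c) := by
  have hn : 1 ≤ cs.length := by cases cs <;> simp_all
  have hn2 : cs.length - 1 < cs.length := by omega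
  have e1 : (cs.length : Int) - 1 = ((cs.length - 1 : Nat) : Int) := by omega
  unfold pvB pvPL
  have h2 : PySem.List.pyGet? (cs ++ [c]) (cs.length : Int) = some c :=
    PySem.List.pyGet?_append_length cs [] c
  rw [e1, h2]
  simp [hn2, List.getLast?_eq_getElem?]

theorem pvBs_append (cs : List Char) (c : Char) :
    pvBs (cs ++ [c]) = pvBs cs ++
      (if pvPL cs && PySem.Chars.isupper c then [(cs.length : Int)] else []) := by
  unfold pvBs
  by_cases hne : cs = []
  · subst hne
    have h1 : PySem.List.pyRange 1 ((([] ++ [c] : List Char)).length : Int) 1 = [] := by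
      simp
    have h0 : PySem.List.pyRange 1 ((([] : List Char)).length : Int) 1 = [] := by
      simp
    rw [h1, h0]
    simp [pvPL, show PySem.Chars.islower ' ' = false from by decide]
  · have hn : 1 ≤ cs.length := List.length_pos_iff.mpr hne
    have e : (((cs ++ [c]).length : Nat) : Int) = (cs.length : Int) + 1 := by
      simp
    rw [e, PySem.List.pyRange_one_succ_right (by exact_mod_cast hn), List.filter_append]
    congr 1
    · exact List.filter_congr (fun i hi => by
        have := PySem.List.mem_pyRange_one.mp hi
        exact pvB_append_lt cs c this.1 this.2)
    · rw [show ([(cs.length : Int)].filter (pvB (cs ++ [c]))) =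
          if pvB (cs ++ [c]) (cs.length : Int) then [(cs.length : Int)] else [] by
            simp [List.filter]; cases pvB (cs ++ [c]) (cs.length : Int) <;> simp]
      rw [pvB_append_last cs c hne]

theorem pvBs_mem (cs : List Char) {i : Int} (h : i ∈ pvBs cs) :
    ∃ j : Nat, i = (j : Int) ∧ j ≤ cs.length := by
  have := PySem.List.mem_pyRange_one.mp (List.mem_of_mem_filter h)
  exact ⟨i.toNat, by omega, by omega⟩

theorem fold_slice_append (cs : List Char) (c : Char) (bs : List Int)
    (hbs : ∀ i ∈ bs, ∃ j : Nat, i = (j : Int) ∧ j ≤ cs.length) :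
    ∀ (acc : List (List Char)) (k : Nat), k ≤ cs.length →
    bs.foldl (pvSliceStep (cs ++ [c])) (acc, (k : Int)) =
      bs.foldl (pvSliceStep cs) (acc, (k : Int)) := by
  induction bs with
  | nil => intro acc k _; rfl
  | cons i bs ih =>
    intro acc k hk
    obtain ⟨j, rfl, hj⟩ := hbs i (by simp)
    have hstep : pvSliceStep (cs ++ [c]) (acc, (k:Int)) (j:Int)
        = (acc ++ [PySem.Chars.slice cs (some (k:Int)) (some (j:Int))], (j:Int)) := by
      unfold pvSliceStep
      simp only [PySem.Chars.slice, PySem.List.slice_natCast]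
      rw [List.drop_append_of_le_length hk]
      congr 2
      rw [List.take_append_of_le_length (by simp [List.length_drop]; omega)]
    simp only [List.foldl_cons, hstep]
    rw [show pvSliceStep cs (acc, (k:Int)) (j:Int)
        = (acc ++ [PySem.Chars.slice cs (some (k:Int)) (some (j:Int))], (j:Int)) from rfl]
    exact ih (fun i hi => hbs i (by simp [hi])) _ j hj

-- Core invariant: B's streaming state is exactly A's slice fold.
theorem pvCore (cs : List Char) :
    ∃ k : Nat, (pvSt cs).2 = (k : Int) ∧ k ≤ cs.length ∧
      pvCSt cs = ((pvSt cs).1, cs.drop k, pvPL cs) := by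
  induction cs using List.reverseRecOn with
  | nil => exact ⟨0, rfl, by simp, rfl⟩
  | append_singleton cs c ih =>
    obtain ⟨k, hk, hkle, hc⟩ := ih
    have hst : pvSt (cs ++ [c]) =
        (pvBs cs ++ (if pvPL cs && PySem.Chars.isupper c then [(cs.length : Int)] else [])).foldl
          (pvSliceStep (cs ++ [c])) ([], 0) := by
      unfold pvSt; rw [pvBs_append]
    have hpre : (pvBs cs).foldl (pvSliceStep (cs ++ [c])) ([], 0) =
        (pvBs cs).foldl (pvSliceStep cs) ([], 0) := by
      have := fold_slice_append cs c (pvBs cs) (fun i hi => pvBs_mem cs hi) [] 0 (by omega)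
      simpa using this
    have hCst : pvCSt (cs ++ [c]) = pvStepC (pvCSt cs) c := by
      unfold pvCSt; rw [List.foldl_append]; rfl
    have hPL : pvPL (cs ++ [c]) = PySem.Chars.islower c := by
      simp [pvPL]
    cases hb : (pvPL cs && PySem.Chars.isupper c) with
    | false =>
      refine ⟨k, ?_, by simp; omega, ?_⟩
      · rw [hst, hb]; simp only [if_false, List.append_nil, Bool.false_eq_true]
        rw [hpre]; exact hk
      · rw [hst, hb]; simp only [if_false, List.append_nil, Bool.false_eq_true]
        rw [hpre]
        rw [hCst, hc]
        unfold pvStepC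
        simp only [hb, Bool.false_eq_true, if_false]
        rw [hPL]
        have : (cs ++ [c]).drop k = cs.drop k ++ [c] := List.drop_append_of_le_length hkle
        rw [this]; rfl
    | true =>
      have hne : cs ≠ [] := by
        intro h; subst h; simp [pvPL, show PySem.Chars.islower ' ' = false from by decide] at hb
      refine ⟨cs.length, ?_, by simp, ?_⟩
      · rw [hst, hb]
        simp only [if_true, List.foldl_append, hpre]
        rfl
      · rw [hst, hb]
        simp only [if_true, List.foldl_append, hpre]
        have hlast : pvSliceStep (cs ++ [c]) (pvSt cs) (cs.length : Int)
            = ((pvSt cs).1 ++ [cs.drop k], (cs.length : Int)) := by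
          unfold pvSliceStep
          rw [hk]
          simp only [PySem.Chars.slice, PySem.List.slice_natCast]
          rw [List.drop_append_of_le_length hkle,
            List.take_append_of_le_length (by simp [List.length_drop])]
          simp [List.take_of_length_le, List.length_drop]
        show pvCSt (cs ++ [c]) = ((pvSliceStep (cs ++ [c]) ((pvBs cs).foldl (pvSliceStep cs) ([], 0)) (cs.length : Int)).1, _, _)
        rw [show (pvBs cs).foldl (pvSliceStep cs) ([], 0) = pvSt cs from rfl, hlast]
        rw [hCst, hc]
        unfold pvStepC
        simp only [hb, if_true]
        rw [hPL]
        simp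

theorem fold_slice_map (cs : List Char) (bs : List Int) :
    ∀ (acc : List (List Char)) (j : Int),
    bs.foldl (fun (p : List String × Int) i =>
        (p.1 ++ [String.ofList (PySem.Chars.slice cs (some p.2) (some i))], i))
      (acc.map String.ofList, j)
    = ((bs.foldl (pvSliceStep cs) (acc, j)).1.map String.ofList,
       (bs.foldl (pvSliceStep cs) (acc, j)).2) := by
  induction bs with
  | nil => intro acc j; rfl
  | cons i bs ih =>
    intro acc j
    simp only [List.foldl_cons]
    have : (acc.map String.ofList ++ [String.ofList (PySem.Chars.slice cs (some j) (some i))], i)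
        = ((acc ++ [PySem.Chars.slice cs (some j) (some i)]).map String.ofList, i) := by
      simp
    rw [this]
    exact ih _ i

theorem foldC_map (cs : List Char) :
    ∀ (acc : List (List Char)) (cur : List Char) (pl : Bool),
    cs.foldl (fun (p : List String × List Char × Bool) ch =>
        if p.2.2 && PySem.Chars.isupper ch then
          (p.1 ++ [String.ofList p.2.1], [ch], PySem.Chars.islower ch)
        else
          (p.1, p.2.1 ++ [ch], PySem.Chars.islower ch))
      (acc.map String.ofList, cur, pl)
    = ((cs.foldl pvStepC (acc, cur, pl)).1.map String.ofList,
       (cs.foldl pvStepC (acc, cur, pl)).2) := by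
  induction cs with
  | nil => intro acc cur pl; rfl
  | cons c cs ih =>
    intro acc cur pl
    simp only [List.foldl_cons]
    cases h : (pl && PySem.Chars.isupper c) with
    | true =>
      rw [show pvStepC (acc, cur, pl) c = (acc ++ [cur], [c], PySem.Chars.islower c) by
        unfold pvStepC; simp [h]]
      simp only [if_true]
      have : (acc.map String.ofList ++ [String.ofList cur], [c], PySem.Chars.islower c)
          = ((acc ++ [cur]).map String.ofList, [c], PySem.Chars.islower c) := by simp
      rw [this]
      exact ih _ _ _
    | false =>
      rw [show pvStepC (acc, cur, pl) c = (acc, cur ++ [c], PySem.Chars.islower c) by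
        unfold pvStepC; simp [h]]
      simp only [h, Bool.false_eq_true, if_false]
      exact ih _ _ _

theorem split_eq (s : String) :
    split_camel_case_string s = split_camel_case_string_alt s := by
  unfold split_camel_case_string split_camel_case_string_alt
  obtain ⟨k, hk, hkle, hc⟩ := pvCore s.toList
  -- A's index table is pvBs
  have hidx : (PySem.List.pyRange 1 (PySem.Str.len s) 1).foldl
      (fun acc i =>
        if PySem.Chars.islower ((PySem.Str.pyGet? s (i - 1)).getD ' ') &&
           PySem.Chars.isupper ((PySem.Str.pyGet? s i).getD ' ')
        then acc ++ [i] else acc) [] = pvBs s.toList := by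
    rw [show (fun (acc : List Int) i =>
        if PySem.Chars.islower ((PySem.Str.pyGet? s (i - 1)).getD ' ') &&
           PySem.Chars.isupper ((PySem.Str.pyGet? s i).getD ' ')
        then acc ++ [i] else acc) = (fun acc i => if pvB s.toList i then acc ++ [i] else acc)
      from rfl]
    rw [show PySem.Str.len s = (s.toList.length : Int) from rfl]
    simpa [pvBs] using PySem.List.foldl_append_if (pvB s.toList) id
      (PySem.List.pyRange 1 (s.toList.length : Int) 1) []
  rw [hidx]
  -- B's fold is pvCSt, mapped
  have hB : s.toList.foldl
      (fun (p : List String × List Char × Bool) ch =>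
        if p.2.2 && PySem.Chars.isupper ch then
          (p.1 ++ [String.ofList p.2.1], [ch], PySem.Chars.islower ch)
        else
          (p.1, p.2.1 ++ [ch], PySem.Chars.islower ch)) ([], [], false)
      = ((pvCSt s.toList).1.map String.ofList, (pvCSt s.toList).2) := by
    simpa [pvCSt] using foldC_map s.toList [] [] false
  rw [hB, hc]
  by_cases hbs : pvBs s.toList = []
  · simp only [hbs, if_true]
    have hst : pvSt s.toList = ([], 0) := by simp [pvSt, hbs]
    have hk0 : k = 0 := by rw [hst] at hk; simpa using hk.symm
    simp [hst, hk0]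
  · simp only [hbs, if_false]
    -- A's slice fold, mapped
    have hA : (pvBs s.toList).foldl
        (fun (p : List String × Int) index =>
          (p.1 ++ [PySem.Str.slice s (some p.2) (some index)], index)) ([], 0)
        = ((pvSt s.toList).1.map String.ofList, (pvSt s.toList).2) := by
      simpa [pvSt, PySem.Str.slice] using fold_slice_map s.toList (pvBs s.toList) [] 0
    rw [hA]
    rw [PySem.List.foldl_append_singleton]
    simp only [List.nil_append, hk]
    rw [show PySem.Str.slice s (some (k : Int)) none
        = String.ofList (s.toList.drop k) by
      simp [PySem.Str.slice, PySem.Chars.slice, PySem.List.slice_from_natCast]]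

-- B's (results, seen) pair stays (r, r): the seen set is exactly the result list.
theorem outer_fold (l : List String) :
    ∀ (acc : List (List String)),
    l.foldl (fun (st : List (List String) × PySem.Set (List String)) ts =>
        let casing_split := split_camel_case_string_alt ts
        if PySem.Set.contains st.2 casing_split then st
        else (st.1 ++ [casing_split], PySem.Set.add st.2 casing_split)) (acc, acc)
    = (l.foldl (fun results ts =>
         let casing_split := split_camel_case_string ts
         if casing_split ∈ results then results else results ++ [casing_split]) acc,
       l.foldl (fun results ts =>
         let casing_split := split_camel_case_string ts
         if casing_split ∈ results then results else results ++ [casing_split]) acc) := by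
  induction l with
  | nil => intro acc; rfl
  | cons ts l ih =>
    intro acc
    simp only [List.foldl_cons, split_eq ts]
    by_cases hm : split_camel_case_string_alt ts ∈ acc
    · rw [show PySem.Set.contains acc (split_camel_case_string_alt ts) = true by
        simpa [PySem.Set.contains] using hm]
      simp only [if_true, hm]
      exact ih acc
    · rw [show PySem.Set.contains acc (split_camel_case_string_alt ts) = false by
        simpa [PySem.Set.contains] using hm]
      rw [show PySem.Set.add acc (split_camel_case_string_alt ts)
          = acc ++ [split_camel_case_string_alt ts] by
        simp [PySem.Set.add, PySem.Set.contains, hm]]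
      simp only [Bool.false_eq_true, if_false, hm]
      exact ih _

-- ===== VERDICT (by name: the statement is the Claim_ definition above) =====
theorem generate_strings_for_type_symbols_spec : Claim_equal_generate_strings_for_type_symbols := by
  intro type_symbols _
  unfold Spec_generate_strings_for_type_symbols
  unfold generate_strings_for_type_symbols generate_strings_for_type_symbols_alt
  rw [show (PySem.Set.empty : PySem.Set (List String)) = ([] : List (List String)) from rfl,
    outer_fold type_symbols []]
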